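-- pv_equiv track=rewrite | github.com/xuanxuan27/IGTGS_experiment | grid_builder.py | calculate_optimal_shift
-- ===== SOURCE A (Python) =====
-- def calculate_optimal_shift(chords: list[str], time_signature: int, padding_count: int = 0) -> int:
--     if not chords:
--         return 0
--
--     best_shift = 0
--     best_changes = -1
--
--     for shift in range(time_signature):
--         previous_downbeat_chord = ""
--         chord_changes = 0
--
--         for index, chord in enumerate(chords):
--             visual_position = padding_count + shift + index
--             beat_in_measure = (visual_position % time_signature) + 1
--             is_downbeat = beat_in_measure == 1
--             if not is_downbeat:
--                 continue
--
--             is_valid = chord not in ("", "N.C.", "N/C", "N")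
--             is_change = is_valid and previous_downbeat_chord and chord != previous_downbeat_chord
--             chord_starts_here = index == 0 or chords[index - 1] != chord
--
--             if is_change and chord_starts_here:
--                 chord_changes += 1
--
--             if is_valid:
--                 previous_downbeat_chord = chord
--
--         if chord_changes > best_changes:
--             best_shift = shift
--             best_changes = chord_changes
--
--     return best_shift
-- ===== SOURCE B (Python) =====
-- def _step(chords, st, i, c):
--     if c in ("", "N.C.", "N/C", "N"):
--         return st
--     prev, changes = st
--     if prev and c != prev and (i == 0 or chords[i - 1] != c):
--         changes += 1
--     return (c, changes)
--
--
-- def calculate_optimal_shift(chords: list[str], time_signature: int, padding_count: int = 0) -> int: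
--     if not chords or time_signature <= 0:
--         return 0
--     ts = time_signature
--     # One pass: states[r] holds (last valid downbeat chord, change count) for the
--     # residue class of indices i with i % ts == r; every shift's downbeats are one class.
--     states = [("", 0)] * ts
--     for i, c in enumerate(chords):
--         r = i % ts
--         states[r] = _step(chords, states[r], i, c)
--     best_shift, best_changes = 0, -1
--     for shift in range(ts):
--         changes = states[(-(padding_count + shift)) % ts][1]
--         if changes > best_changes:
--             best_shift, best_changes = shift, changes
--     return best_shift
-- ===== Notes on version B (the rewrite author's own statement) =====
-- stated objective: faster
-- what changed: A rescans the whole chord list once per shift; B makes a single pass maintaining one (previous-downbeat-chord, change-count) state per residue class of index mod time_signature, then each shift just looks up its class's count.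
import Mathlib
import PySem

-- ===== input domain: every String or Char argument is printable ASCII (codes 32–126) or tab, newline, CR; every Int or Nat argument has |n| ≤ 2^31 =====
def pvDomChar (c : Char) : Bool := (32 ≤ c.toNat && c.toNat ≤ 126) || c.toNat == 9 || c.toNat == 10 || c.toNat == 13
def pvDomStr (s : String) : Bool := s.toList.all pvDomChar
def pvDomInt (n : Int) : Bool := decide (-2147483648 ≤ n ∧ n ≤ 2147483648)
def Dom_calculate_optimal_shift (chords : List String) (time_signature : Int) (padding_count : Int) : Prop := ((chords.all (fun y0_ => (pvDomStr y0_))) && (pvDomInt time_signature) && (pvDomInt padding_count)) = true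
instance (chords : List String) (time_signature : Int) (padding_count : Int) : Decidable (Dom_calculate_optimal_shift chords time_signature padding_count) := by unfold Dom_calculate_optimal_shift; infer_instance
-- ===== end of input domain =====

-- B replaces A's per-shift full rescans by ONE pass keeping a (prev, changes) state per
-- residue class of index mod time_signature, then a lookup per shift: an asymptotically
-- faster exact recomputation of the same best shift.


-- ===== PORT A =====
def calculate_optimal_shift (chords : List String) (time_signature : Int) (padding_count : Int) : Int :=
  if chords = [] then 0
  else
    ((PySem.List.pyRange 0 time_signature 1).foldl
      (fun (best : Int × Int) (shift : Int) =>
        let inner := (PySem.List.enumerate chords).foldl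
          (fun (st : String × Int) (pr : Int × String) =>
            let index := pr.1
            let chord := pr.2
            let visual_position := padding_count + shift + index
            let beat_in_measure := PySem.Int.mod visual_position time_signature + 1
            if ¬ (beat_in_measure = 1) then st
            else
              let is_valid := !(chord == "" || chord == "N.C." || chord == "N/C" || chord == "N")
              let is_change := is_valid && !(st.1 == "") && !(chord == st.1)
              let chord_starts_here := (index == 0) || !(PySem.List.pyGetD chords (index - 1) "" == chord)
              let chord_changes := if is_change && chord_starts_here then st.2 + 1 else st.2
              let previous := if is_valid then chord else st.1
              (previous, chord_changes))
          ("", 0)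
        if inner.2 > best.2 then (shift, inner.2) else best)
      (0, -1)).1

-- ===== PORT B =====
-- helper: python _step(chords, st, i, c) of Source B (pr = (i, c))
def pvStepB (chords : List String) (st : String × Int) (pr : Int × String) : String × Int :=
  let i := pr.1
  let c := pr.2
  if c == "" || c == "N.C." || c == "N/C" || c == "N" then st
  else (c, if (!(st.1 == "") && !(c == st.1)) && ((i == 0) || !(PySem.List.pyGetD chords (i - 1) "" == c))
           then st.2 + 1 else st.2)

def calculate_optimal_shift_alt (chords : List String) (time_signature : Int) (padding_count : Int) : Int :=
  if chords = [] ∨ time_signature ≤ 0 then 0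
  else
    -- one pass: states[r] = _step-folded state of the indices i with i % ts == r
    let states := (PySem.List.enumerate chords).foldl
      (fun (states : List (String × Int)) (pr : Int × String) =>
        let r := (PySem.Int.mod pr.1 time_signature).toNat
        states.set r (pvStepB chords (states.getD r ("", 0)) pr))
      (List.replicate time_signature.toNat ("", 0))
    -- then each shift just looks up its residue class's change count
    ((PySem.List.pyRange 0 time_signature 1).foldl
      (fun (best : Int × Int) (shift : Int) =>
        let changes := (states.getD (PySem.Int.mod (-(padding_count + shift)) time_signature).toNat ("", 0)).2
        if changes > best.2 then (shift, changes) else best)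
      (0, -1)).1

-- ===== PRECONDITION & SPEC =====
def Spec_calculate_optimal_shift (chords : List String) (time_signature : Int) (padding_count : Int) (out : Int) : Prop := out = calculate_optimal_shift_alt chords time_signature padding_count
instance (chords : List String) (time_signature : Int) (padding_count : Int) (out : Int) : Decidable (Spec_calculate_optimal_shift chords time_signature padding_count out) := by unfold Spec_calculate_optimal_shift; infer_instance

-- ===== CLAIM (what is proved, stated in full; the proofs are below) =====
def Claim_equal_calculate_optimal_shift : Prop := ∀ (chords : List String) (time_signature : Int) (padding_count : Int), Dom_calculate_optimal_shift chords time_signature padding_count → Spec_calculate_optimal_shift chords time_signature padding_count (calculate_optimal_shift chords time_signature padding_count)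

-- ===== LEMMAS AND PROOFS =====

-- Reading slot r of the one-pass dispatch fold = folding pvStepB over the elements whose
-- index is in residue class r.
lemma dispatch_getD (chords : List String) (ts : Int) (hts : 0 < ts) :
    ∀ (l : List (Int × String)) (states : List (String × Int)),
      states.length = ts.toNat → ∀ r : Nat,
      ((l.foldl
          (fun (states : List (String × Int)) (pr : Int × String) =>
            states.set ((PySem.Int.mod pr.1 ts).toNat)
              (pvStepB chords (states.getD ((PySem.Int.mod pr.1 ts).toNat) ("", 0)) pr))
          states).getD r ("", 0))
      = (l.filter (fun pr => (PySem.Int.mod pr.1 ts).toNat == r)).foldl (pvStepB chords)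
          (states.getD r ("", 0)) := by
  intro l
  induction l with
  | nil => intro states _ r; simp
  | cons pr t ih =>
    intro states hlen r
    have hr' : (PySem.Int.mod pr.1 ts).toNat < states.length := by
      have h1 := PySem.Int.mod_lt pr.1 hts
      have h2 := PySem.Int.mod_nonneg pr.1 hts
      omega
    simp only [List.foldl_cons, List.filter_cons]
    rw [ih _ (by rw [List.length_set]; exact hlen)]
    by_cases h : ((PySem.Int.mod pr.1 ts).toNat == r) = true
    · have hr : (PySem.Int.mod pr.1 ts).toNat = r := by exact beq_iff_eq.mp h
      rw [if_pos h]
      subst hr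
      simp only [List.foldl_cons]
      congr 1
      rw [List.getD_eq_getElem?_getD, List.getElem?_set_self (by exact hr')]
      rfl
    · rw [if_neg h]
      have hne : (PySem.Int.mod pr.1 ts).toNat ≠ r := by
        intro hc; exact h (beq_iff_eq.mpr hc)
      congr 1
      rw [List.getD_eq_getElem?_getD, List.getD_eq_getElem?_getD, List.getElem?_set_ne hne]
      rw [← List.getD_eq_getElem?_getD]

-- A's inner scan for a shift = folding pvStepB over exactly that shift's residue class.
lemma innerA_eq (chords : List String) (ts p shift : Int) (hts : 0 < ts) :
    (PySem.List.enumerate chords).foldl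
      (fun (st : String × Int) (pr : Int × String) =>
        let index := pr.1
        let chord := pr.2
        let visual_position := p + shift + index
        let beat_in_measure := PySem.Int.mod visual_position ts + 1
        if ¬ (beat_in_measure = 1) then st
        else
          let is_valid := !(chord == "" || chord == "N.C." || chord == "N/C" || chord == "N")
          let is_change := is_valid && !(st.1 == "") && !(chord == st.1)
          let chord_starts_here := (index == 0) || !(PySem.List.pyGetD chords (index - 1) "" == chord)
          let chord_changes := if is_change && chord_starts_here then st.2 + 1 else st.2
          let previous := if is_valid then chord else st.1
          (previous, chord_changes))
      ("", 0)
    = ((PySem.List.enumerate chords).filter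
        (fun pr => (PySem.Int.mod pr.1 ts).toNat == (PySem.Int.mod (-(p + shift)) ts).toNat)).foldl
        (pvStepB chords) ("", 0) := by
  rw [← PySem.List.foldl_if_eq_foldl_filter]
  apply PySem.List.foldl_congr_mem
  intro st pr _
  have hcond : (PySem.Int.mod (p + shift + pr.1) ts + 1 = 1)
      ↔ (((PySem.Int.mod pr.1 ts).toNat == (PySem.Int.mod (-(p + shift)) ts).toNat) = true) := by
    rw [PySem.Int.mod_eq_emod_of_pos hts, PySem.Int.mod_eq_emod_of_pos hts,
        PySem.Int.mod_eq_emod_of_pos hts, beq_iff_eq]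
    have h1 : pr.1 % ts = -(p + shift) % ts ↔ (pr.1 - -(p + shift)) % ts = 0 :=
      Int.emod_eq_emod_iff_emod_sub_eq_zero
    have h2 : pr.1 - -(p + shift) = p + shift + pr.1 := by ring
    rw [h2] at h1
    have h3 : 0 ≤ pr.1 % ts := Int.emod_nonneg _ (by omega)
    have h4 : 0 ≤ -(p + shift) % ts := Int.emod_nonneg _ (by omega)
    omega
  by_cases h : ((PySem.Int.mod pr.1 ts).toNat == (PySem.Int.mod (-(p + shift)) ts).toNat) = true
  · rw [if_pos h]
    have : ¬ ¬ (PySem.Int.mod (p + shift + pr.1) ts + 1 = 1) := by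
      simp only [not_not]; exact hcond.mpr h
    rw [if_neg this]
    unfold pvStepB
    by_cases hv : (pr.2 == "" || pr.2 == "N.C." || pr.2 == "N/C" || pr.2 == "N") = true
    · simp [hv]
    · simp only [hv, Bool.not_false, if_true, Bool.true_and, Bool.and_assoc]
      simp at hv
      simp
  · rw [if_neg h]
    have : ¬ (PySem.Int.mod (p + shift + pr.1) ts + 1 = 1) := fun hc => h (hcond.mp hc)
    rw [if_pos this]

-- ===== VERDICT (by name: the statement is the Claim_ definition above) =====
theorem calculate_optimal_shift_spec : Claim_equal_calculate_optimal_shift := by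
  intro chords ts p _
  unfold Spec_calculate_optimal_shift calculate_optimal_shift calculate_optimal_shift_alt
  by_cases hnil : chords = []
  · simp [hnil]
  · by_cases hts : ts ≤ 0
    · have hr : PySem.List.pyRange 0 ts 1 = [] := PySem.List.pyRange_one_eq_nil hts
      simp [hnil, hts, hr]
    · have hts' : 0 < ts := by omega
      have hne : ¬ (chords = [] ∨ ts ≤ 0) := by tauto
      simp only [if_neg hnil, if_neg hne]
      refine congrArg Prod.fst ?_
      apply PySem.List.foldl_congr_mem
      intro best shift _
      rw [innerA_eq chords ts p shift hts',
          dispatch_getD chords ts hts' (PySem.List.enumerate chords)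
            (List.replicate ts.toNat ("", 0)) (by simp) _]
      have hrep : ∀ (n r : Nat), (List.replicate n (("", (0:Int)))).getD r ("", 0) = ("", 0) := by
        intro n r
        induction n generalizing r with
        | zero => simp
        | succ n ih => cases r <;> simp [ih]
      rw [hrep]
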